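-- pv_equiv track=rewrite | github.com/BeckZero/ComfyUI | api_server/routes/internal/internal_routes.py | _is_safe_git_ref
-- ===== SOURCE A (Python) =====
-- def _is_safe_git_ref(value: str) -> bool:
--     if not value:
--         return False
--     if value.startswith("/") or value.endswith("/") or value.endswith(".lock"):
--         return False
--     if ".." in value:
--         return False
--     if any(char in value for char in (" ", "~", "^", ":", "?", "*", "\\", "[", "]", "@")):
--         return False
--     return True
-- ===== SOURCE B (Python) =====
-- _FORBIDDEN = frozenset(' ~^:?*\\[]@')
--
--
-- def _is_safe_git_ref(value: str) -> bool:
--     if not value: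
--         return False
--     if value[0] == '/' or value[-1] == '/' or value.endswith('.lock'):
--         return False
--     prev = ''
--     for ch in value:
--         if ch in _FORBIDDEN:
--             return False
--         if ch == '.' and prev == '.':
--             return False
--         prev = ch
--     return True
-- ===== Notes on version B (the rewrite author's own statement) =====
-- stated objective: alternative
-- what changed: Replaces A's substring search for the double-dot sequence and its ten separate per-character membership scans with a single left-to-right pass that tracks the previous character; boundary checks use direct first/last indexing.
import Mathlib
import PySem

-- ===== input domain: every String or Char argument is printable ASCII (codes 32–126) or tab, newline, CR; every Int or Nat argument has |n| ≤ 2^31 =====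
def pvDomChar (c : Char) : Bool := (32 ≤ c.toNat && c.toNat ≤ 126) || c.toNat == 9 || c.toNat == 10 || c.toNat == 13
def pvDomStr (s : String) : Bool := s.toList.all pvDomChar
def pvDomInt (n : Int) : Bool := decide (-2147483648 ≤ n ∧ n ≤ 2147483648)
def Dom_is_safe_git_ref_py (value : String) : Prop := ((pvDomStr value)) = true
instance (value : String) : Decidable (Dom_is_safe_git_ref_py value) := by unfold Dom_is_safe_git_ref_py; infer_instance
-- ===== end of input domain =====

-- B replaces A's substring search for ".." and its ten per-character membership scans
-- by one left-to-right pass tracking the previous character (objective: alternative, same cost).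


-- ===== PORT A =====
-- the tuple (" ", "~", "^", ":", "?", "*", "\\", "[", "]", "@") of A's `any(...)`
def pyForbiddenA : List String := [" ", "~", "^", ":", "?", "*", "\\", "[", "]", "@"]

def is_safe_git_ref_py (value : String) : Bool :=
  if value.toList = [] then false
  else if PySem.Str.startswith value "/" || PySem.Str.endswith value "/"
          || PySem.Str.endswith value ".lock" then false
  else if PySem.Str.isIn ".." value then false
  else if pyForbiddenA.any (fun ch => PySem.Str.isIn ch value) then false
  else true

-- ===== PORT B =====
-- the frozenset _FORBIDDEN of Source B
def altForbidden (c : Char) : Bool := [' ', '~', '^', ':', '?', '*', '\\', '[', ']', '@'].contains c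

-- the `for ch in value` loop of Source B: prev = none models Python's initial prev = ''
def altLoop : Option Char → List Char → Bool
  | _, [] => true
  | prev, c :: rest =>
    if altForbidden c then false
    else if c = '.' && prev == some '.' then false
    else altLoop (some c) rest

def is_safe_git_ref_py_alt (value : String) : Bool :=
  if value.toList = [] then false
  else if PySem.Str.pyGet? value 0 == some '/' || PySem.Str.pyGet? value (-1) == some '/'
          || PySem.Str.endswith value ".lock" then false
  else altLoop none value.toList

-- ===== PRECONDITION & SPEC =====
def Spec_is_safe_git_ref_py (value : String) (out : Bool) : Prop := out = is_safe_git_ref_py_alt value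
instance (value : String) (out : Bool) : Decidable (Spec_is_safe_git_ref_py value out) := by unfold Spec_is_safe_git_ref_py; infer_instance

-- ===== CLAIM (what is proved, stated in full; the proofs are below) =====
def Claim_equal_is_safe_git_ref_py : Prop := ∀ (value : String), Dom_is_safe_git_ref_py value → Spec_is_safe_git_ref_py value (is_safe_git_ref_py value)

-- ===== LEMMAS AND PROOFS =====

-- negative indexing: value[-1] is the last element
lemma pyGet_neg_one (s : List Char) (h : s ≠ []) : PySem.List.pyGet? s (-1) = s.getLast? := by
  unfold PySem.List.pyGet? PySem.List.pyIdx?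
  have hl : 1 ≤ s.length := List.length_pos_iff.mpr h
  rw [if_neg (by omega), if_pos (by omega)]
  simp only [Option.bind_some, neg_neg, Int.toNat_one]
  rw [List.getLast?_eq_getElem?]

lemma singleton_prefix_iff (c : Char) (s : List Char) : [c] <+: s ↔ s.head? = some c := by
  cases s with
  | nil => simp
  | cons b t => simp [List.cons_prefix_cons, eq_comm]

lemma singleton_suffix_iff (c : Char) (s : List Char) : [c] <:+ s ↔ s.getLast? = some c := by
  rw [← List.reverse_prefix, List.reverse_singleton, singleton_prefix_iff, List.head?_reverse]

-- the single pass rejects exactly: a forbidden character anywhere, or an adjacent dot pair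
-- (including the pair straddling prev and the head of the remaining input)
lemma altLoop_eq_false_iff (s : List Char) : ∀ prev : Option Char,
    altLoop prev s = false ↔
      (∃ c ∈ s, altForbidden c = true) ∨ (prev = some '.' ∧ s.head? = some '.') ∨
        ['.', '.'] <:+: s := by
  induction s with
  | nil => intro prev; simp [altLoop]
  | cons c rest ih =>
    intro prev
    by_cases hf : altForbidden c = true
    · simp [altLoop, hf]
    · by_cases hd : c = '.' ∧ prev = some '.'
      · rw [altLoop]
        simp only [hd.1, hd.2]
        simp
      · rw [altLoop]
        have hb : (c = '.' && prev == some '.') = false := by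
          cases prev <;> simp_all [not_and]
        simp only [hf, Bool.false_eq_true, if_false, hb, ih (some c),
          List.infix_cons_iff, List.mem_cons, List.head?_cons]
        constructor
        · rintro (⟨x, hx, hfx⟩ | ⟨h1, h2⟩ | h3)
          · exact Or.inl ⟨x, Or.inr hx, hfx⟩
          · refine Or.inr (Or.inr (Or.inl ?_))
            rw [Option.some_inj] at h1
            rw [List.cons_prefix_cons]
            exact ⟨h1.symm, (singleton_prefix_iff _ _).mpr h2⟩
          · exact Or.inr (Or.inr (Or.inr h3))
        · rintro (⟨x, hx | hx, hfx⟩ | ⟨h1, h2⟩ | hp | h3)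
          · exact absurd (hx ▸ hfx) (by simp [hf])
          · exact Or.inl ⟨x, hx, hfx⟩
          · exact absurd ⟨by simpa using h2, h1⟩ hd
          · rw [List.cons_prefix_cons] at hp
            exact Or.inr (Or.inl ⟨by rw [← hp.1], (singleton_prefix_iff _ _).mp hp.2⟩)
          · exact Or.inr (Or.inr h3)

lemma mem_forbidden_exists (c : Char) (h : altForbidden c = true) :
    ∃ ch ∈ pyForbiddenA, ch.toList = [c] := by
  have hm : c ∈ [' ', '~', '^', ':', '?', '*', '\\', '[', ']', '@'] := by
    simpa [altForbidden] using h
  simp only [List.mem_cons, List.not_mem_nil, or_false] at hm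
  rcases hm with h|h|h|h|h|h|h|h|h|h <;> subst h
  · exact ⟨" ", by simp [pyForbiddenA], by decide⟩
  · exact ⟨"~", by simp [pyForbiddenA], by decide⟩
  · exact ⟨"^", by simp [pyForbiddenA], by decide⟩
  · exact ⟨":", by simp [pyForbiddenA], by decide⟩
  · exact ⟨"?", by simp [pyForbiddenA], by decide⟩
  · exact ⟨"*", by simp [pyForbiddenA], by decide⟩
  · exact ⟨"\\", by simp [pyForbiddenA], by decide⟩
  · exact ⟨"[", by simp [pyForbiddenA], by decide⟩
  · exact ⟨"]", by simp [pyForbiddenA], by decide⟩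
  · exact ⟨"@", by simp [pyForbiddenA], by decide⟩

lemma scan_eq (s : List Char) :
    (PySem.Chars.isIn ['.', '.'] s || pyForbiddenA.any (fun ch => PySem.Chars.isIn ch.toList s))
      = !altLoop none s := by
  rw [Bool.eq_iff_iff]
  simp only [Bool.not_eq_true', Bool.or_eq_true, List.any_eq_true, altLoop_eq_false_iff,
    PySem.Chars.isIn_iff_infix]
  constructor
  · rintro (h | ⟨ch, hm, hin⟩)
    · exact Or.inr (Or.inr h)
    · simp only [pyForbiddenA, List.mem_cons, List.not_mem_nil, or_false] at hm
      have hx : ∃ c, ch.toList = [c] ∧ altForbidden c = true := by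
        rcases hm with h|h|h|h|h|h|h|h|h|h <;> subst h
        · exact ⟨' ', by decide, by decide⟩
        · exact ⟨'~', by decide, by decide⟩
        · exact ⟨'^', by decide, by decide⟩
        · exact ⟨':', by decide, by decide⟩
        · exact ⟨'?', by decide, by decide⟩
        · exact ⟨'*', by decide, by decide⟩
        · exact ⟨'\\', by decide, by decide⟩
        · exact ⟨'[', by decide, by decide⟩
        · exact ⟨']', by decide, by decide⟩
        · exact ⟨'@', by decide, by decide⟩
      obtain ⟨c, hc, hf⟩ := hx
      rw [hc] at hin
      exact Or.inl ⟨c, (List.singleton_infix_iff c _).mp hin, hf⟩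
  · rintro (⟨c, hc, hf⟩ | ⟨h1, _⟩ | h)
    · obtain ⟨ch, hm, he⟩ := mem_forbidden_exists c hf
      exact Or.inr ⟨ch, hm, he ▸ (List.singleton_infix_iff c s).mpr hc⟩
    · exact absurd h1 (by simp)
    · exact Or.inl h

lemma scan_eq' (value : String) :
    (PySem.Str.isIn ".." value || pyForbiddenA.any (fun ch => PySem.Str.isIn ch value))
      = !altLoop none value.toList := by
  have h := scan_eq value.toList
  simpa using h

-- ===== VERDICT (by name: the statement is the Claim_ definition above) =====
theorem is_safe_git_ref_py_spec : Claim_equal_is_safe_git_ref_py := by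
  intro value _
  show is_safe_git_ref_py value = is_safe_git_ref_py_alt value
  unfold is_safe_git_ref_py is_safe_git_ref_py_alt
  by_cases hnil : value.toList = []
  · simp [hnil]
  · rw [if_neg hnil, if_neg hnil]
    have hstart : PySem.Str.startswith value "/" = (PySem.Str.pyGet? value 0 == some '/') := by
      rw [Bool.eq_iff_iff]
      simp only [PySem.Str.startswith_eq, PySem.Str.pyGet?_eq, PySem.Chars.pyGet?_eq_listPyGet?]
      rw [PySem.Chars.startswith_iff, show ("/".toList) = ['/'] from rfl, singleton_prefix_iff]
      have : PySem.List.pyGet? value.toList 0 = value.toList.head? := by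
        rw [show (0 : Int) = ((0 : Nat) : Int) from rfl, PySem.List.pyGet?_natCast]
        simp [List.head?_eq_getElem?]
      rw [this]
      simp
    have hend : PySem.Str.endswith value "/" = (PySem.Str.pyGet? value (-1) == some '/') := by
      rw [Bool.eq_iff_iff]
      simp only [PySem.Str.endswith_eq, PySem.Str.pyGet?_eq, PySem.Chars.pyGet?_eq_listPyGet?]
      rw [PySem.Chars.endswith_iff, show ("/".toList) = ['/'] from rfl, singleton_suffix_iff,
        pyGet_neg_one _ hnil]
      simp
    rw [hstart, hend]
    by_cases hguard : ((PySem.Str.pyGet? value 0 == some '/') || PySem.Str.pyGet? value (-1) == some '/'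
          || PySem.Str.endswith value ".lock") = true
    · rw [if_pos hguard, if_pos hguard]
    · rw [if_neg hguard, if_neg hguard]
      rcases hA : altLoop none value.toList with _ | _
      · have hor := scan_eq' value
        rw [hA, Bool.not_false] at hor
        by_cases h1 : PySem.Str.isIn ".." value = true
        · rw [if_pos h1]
        · rw [if_neg h1]
          have h2 : (pyForbiddenA.any fun ch => PySem.Str.isIn ch value) = true := by
            rcases Bool.or_eq_true_iff.mp hor with h|h
            · exact absurd h h1
            · exact h
          rw [if_pos h2]
      · have hor := scan_eq' value
        rw [hA, Bool.not_true] at hor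
        obtain ⟨h1, h2⟩ := Bool.or_eq_false_iff.mp hor
        rw [if_neg (by simpa using h1), if_neg (by simpa using h2)]
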